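-- pv_equiv track=rewrite | github.com/revatikulkarni40/Task-2 | ai_integrated_system.py | parse_input_with_text
-- ===== SOURCE A (Python) =====
-- from typing import Dict, List, Any, Union
--
-- def parse_input_with_text(raw_input: str) -> List[str]:
--     """
--     Parse input that may contain text with commas
--     Format: value1 | value2 | text with, commas | value3
--     """
--     # Check if using pipe separator (easier for text)
--     if '|' in raw_input:
--         parts = [p.strip() for p in raw_input.split('|')]
--     else:
--         # Try to handle quoted strings with commas
--         parts = []
--         current = ""
--         in_quotes = False
--
--         for char in raw_input:
--             if char == '"' or char == "'":
--                 in_quotes = not in_quotes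
--             elif char == ',' and not in_quotes:
--                 parts.append(current.strip())
--                 current = ""
--             else:
--                 current += char
--
--         if current:
--             parts.append(current.strip())
--
--     return parts
-- ===== SOURCE B (Python) =====
-- def parse_input_with_text(raw_input):
--     if '|' in raw_input:
--         return [p.strip() for p in raw_input.split('|')]
--     pieces = raw_input.split(',')
--     fields = [pieces[0]]
--     for p in pieces[1:]:
--         if sum(ch in '\'"' for ch in fields[-1]) % 2 == 1:
--             fields[-1] = fields[-1] + ',' + p
--         else:
--             fields.append(p)
--     cleaned = [''.join(ch for ch in f if ch not in '\'"') for f in fields]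
--     parts = [c.strip() for c in cleaned]
--     if cleaned[-1] == '':
--         parts.pop()
--     return parts
-- ===== Notes on version B (the rewrite author's own statement) =====
-- stated objective: alternative
-- what changed: The character-by-character scan with an in_quotes flag is replaced by one comma-split followed by a fold over the pieces that re-glues a piece onto the previous field whenever that field's quote-character count is odd, with quote removal and stripping done per assembled field at the end.
import Mathlib
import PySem

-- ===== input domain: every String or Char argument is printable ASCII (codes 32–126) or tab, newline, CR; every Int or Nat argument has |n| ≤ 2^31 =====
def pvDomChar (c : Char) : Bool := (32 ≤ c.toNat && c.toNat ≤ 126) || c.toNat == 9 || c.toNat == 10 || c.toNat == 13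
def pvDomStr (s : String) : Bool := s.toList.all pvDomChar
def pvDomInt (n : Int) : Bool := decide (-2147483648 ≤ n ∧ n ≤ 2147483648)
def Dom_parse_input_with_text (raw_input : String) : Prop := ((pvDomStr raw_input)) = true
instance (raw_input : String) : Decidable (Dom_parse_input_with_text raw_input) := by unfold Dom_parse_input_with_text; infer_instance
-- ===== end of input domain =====

-- B replaces A's character-by-character quote-tracking scan by a split-on-comma /
-- glue-on-odd-quote-parity fold (different decomposition of the same linear-time task).

def pvIsQuote (c : Char) : Bool := c == '"' || c == '\''

-- ===== PORT A =====
-- state: (parts, current, in_quotes)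
def pvStepA (st : List (List Char) × List Char × Bool) (c : Char) :
    List (List Char) × List Char × Bool :=
  if pvIsQuote c then (st.1, st.2.1, !st.2.2)
  else if c == ',' && !st.2.2 then (st.1 ++ [PySem.Chars.strip st.2.1], [], st.2.2)
  else (st.1, st.2.1 ++ [c], st.2.2)

def parse_input_with_text (raw_input : String) : List String :=
  if PySem.Chars.isIn ['|'] raw_input.toList then
    (PySem.Chars.splitOn raw_input.toList ['|']).map (fun p => String.ofList (PySem.Chars.strip p))
  else
    let st := raw_input.toList.foldl pvStepA ([], [], false)
    let parts := if st.2.1.isEmpty then st.1 else st.1 ++ [PySem.Chars.strip st.2.1]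
    parts.map String.ofList

-- ===== PORT B =====
-- glue step over comma-split pieces: (done fields, open last field)
def pvStepB (fl : List (List Char) × List Char) (p : List Char) :
    List (List Char) × List Char :=
  if fl.2.countP pvIsQuote % 2 == 1 then (fl.1, fl.2 ++ ',' :: p) else (fl.1 ++ [fl.2], p)

def parse_input_with_text_alt (raw_input : String) : List String :=
  if PySem.Chars.isIn ['|'] raw_input.toList then
    (PySem.Chars.splitOn raw_input.toList ['|']).map (fun p => String.ofList (PySem.Chars.strip p))
  else
    let pieces := raw_input.toList.splitOn ','
    let fl := pieces.tail.foldl pvStepB ([], pieces.headD [])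
    let cleaned := (fl.1 ++ [fl.2]).map (fun f => f.filter (fun c => !pvIsQuote c))
    let parts := cleaned.map PySem.Chars.strip
    let out := if cleaned.getLastD [] == ([] : List Char) then parts.dropLast else parts
    out.map String.ofList

-- ===== PRECONDITION & SPEC =====
def Spec_parse_input_with_text (raw_input : String) (out : List String) : Prop := out = parse_input_with_text_alt raw_input
instance (raw_input : String) (out : List String) : Decidable (Spec_parse_input_with_text raw_input out) := by unfold Spec_parse_input_with_text; infer_instance

-- ===== CLAIM (what is proved, stated in full; the proofs are below) =====
def Claim_equal_parse_input_with_text : Prop := ∀ (raw_input : String), Dom_parse_input_with_text raw_input → Spec_parse_input_with_text raw_input (parse_input_with_text raw_input)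

-- ===== LEMMAS AND PROOFS =====

def pvRmq (p : List Char) : List Char := p.filter (fun c => !pvIsQuote c)
def pvQpar (p : List Char) : Bool := p.countP pvIsQuote % 2 == 1
def pvF (r : List Char) : List Char := PySem.Chars.strip (pvRmq r)

theorem pvQpar_append (a b : List Char) : pvQpar (a ++ b) = (pvQpar a ^^ pvQpar b) := by
  unfold pvQpar
  rw [List.countP_append, Nat.add_mod]
  rcases Nat.mod_two_eq_zero_or_one (a.countP pvIsQuote) with ha | ha <;>
    rcases Nat.mod_two_eq_zero_or_one (b.countP pvIsQuote) with hb | hb <;>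
    rw [ha, hb] <;> decide

theorem pvQpar_cons_quote (c : Char) (t : List Char) (hq : pvIsQuote c = true) :
    pvQpar (c :: t) = !pvQpar t := by
  unfold pvQpar
  rw [List.countP_cons]
  simp only [hq, if_true]
  rw [Nat.add_mod]
  rcases Nat.mod_two_eq_zero_or_one (t.countP pvIsQuote) with h | h <;> rw [h] <;> decide

theorem pvPieceScan (p : List Char) (h : ',' ∉ p) (parts : List (List Char))
    (cur : List Char) (q : Bool) :
    p.foldl pvStepA (parts, cur, q) = (parts, cur ++ pvRmq p, q ^^ pvQpar p) := by
  induction p generalizing cur q with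
  | nil => simp [pvRmq, pvQpar]
  | cons c t ih =>
    have hc : c ≠ ',' := fun hc => h (hc ▸ List.mem_cons_self ..)
    have hc2 : (c == ',') = false := by simpa using hc
    have ht : ',' ∉ t := fun hm => h (List.mem_cons_of_mem _ hm)
    by_cases hq : pvIsQuote c = true
    · rw [List.foldl_cons,
        show pvStepA (parts, cur, q) c = (parts, cur, !q) from by simp [pvStepA, hq],
        ih ht, pvQpar_cons_quote c t hq,
        show pvRmq (c :: t) = pvRmq t from by simp [pvRmq, hq]]
      cases q <;> simp
    · have hq' : pvIsQuote c = false := by revert hq; cases pvIsQuote c <;> simp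
      rw [List.foldl_cons,
        show pvStepA (parts, cur, q) c = (parts, cur ++ [c], q) from by
          simp [pvStepA, hq', hc2],
        ih ht]
      simp [pvRmq, pvQpar, hq']

theorem pvMain (ps : List (List Char)) (h : ∀ p ∈ ps, ',' ∉ p)
    (done : List (List Char)) (last : List Char) :
    (ps.flatMap (fun p => ',' :: p)).foldl pvStepA (done.map pvF, pvRmq last, pvQpar last)
      = ((ps.foldl pvStepB (done, last)).1.map pvF,
         pvRmq (ps.foldl pvStepB (done, last)).2,
         pvQpar (ps.foldl pvStepB (done, last)).2) := by
  induction ps generalizing done last with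
  | nil => simp
  | cons p t ih =>
    have hp : ',' ∉ p := h p (List.mem_cons_self ..)
    have ht : ∀ x ∈ t, ',' ∉ x := fun x hx => h x (List.mem_cons_of_mem _ hx)
    have hqc : pvIsQuote ',' = false := by decide
    simp only [List.flatMap_cons, List.foldl_cons, List.foldl_append]
    by_cases hq : pvQpar last = true
    · have hstep : pvStepA (done.map pvF, pvRmq last, pvQpar last) ','
          = (done.map pvF, pvRmq last ++ [','], pvQpar last) := by
        simp [pvStepA, hqc, hq]
      have h1 : pvRmq last ++ [','] ++ pvRmq p = pvRmq (last ++ ',' :: p) := by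
        simp [pvRmq, List.filter_append, hqc]
      have h2 : (pvQpar last ^^ pvQpar p) = pvQpar (last ++ ',' :: p) := by
        rw [pvQpar_append]
        have : pvQpar (',' :: p) = pvQpar p := by
          unfold pvQpar; rw [List.countP_cons]; simp [hqc]
        rw [this]
      have hB : pvStepB (done, last) p = (done, last ++ ',' :: p) := by
        have hb : (last.countP pvIsQuote % 2 == 1) = true := hq
        simp [pvStepB, hb]
      rw [hstep, pvPieceScan p hp, h1, h2, ih ht done (last ++ ',' :: p), hB]
    · have hq' : pvQpar last = false := by revert hq; cases pvQpar last <;> simp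
      have hstep : pvStepA (done.map pvF, pvRmq last, pvQpar last) ','
          = ((done ++ [last]).map pvF, pvRmq [], pvQpar []) := by
        have h0 : last.countP pvIsQuote % 2 = 0 := by
          have hb := hq'; unfold pvQpar at hb
          rcases Nat.mod_two_eq_zero_or_one (last.countP pvIsQuote) with h | h
          · exact h
          · rw [h] at hb; exact absurd hb (by decide)
        simp [pvStepA, pvF, hqc, pvRmq, pvQpar, h0]
      have hB : pvStepB (done, last) p = (done ++ [last], p) := by
        have hb : (last.countP pvIsQuote % 2 == 1) = false := hq'
        simp [pvStepB, hb]
      have e1 : pvRmq [] ++ pvRmq p = pvRmq p := by simp [pvRmq]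
      have e2 : (pvQpar [] ^^ pvQpar p) = pvQpar p := by simp [pvQpar]
      rw [hstep, pvPieceScan p hp, e1, e2, ih ht (done ++ [last]) p, hB]

theorem pvSplit_ne_nil (xs : List Char) : xs.splitOnP (· == ',') ≠ [] := by
  induction xs with
  | nil => simp [List.splitOnP_nil]
  | cons c t ih =>
    rw [List.splitOnP_cons]
    split
    · simp
    · rcases hs : t.splitOnP (· == ',') with _ | ⟨h, t'⟩
      · exact absurd hs ih
      · simp

theorem pvSplit_no_comma (xs : List Char) :
    ∀ q ∈ xs.splitOnP (· == ','), ',' ∉ q := by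
  induction xs with
  | nil => intro q hq; simp [List.splitOnP_nil] at hq; simp [hq]
  | cons c t ih =>
    intro q hq
    rw [List.splitOnP_cons] at hq
    by_cases hc : (c == ',') = true
    · rw [if_pos hc] at hq
      rcases List.mem_cons.mp hq with h | h
      · simp [h]
      · exact ih q h
    · rw [if_neg hc] at hq
      rcases hs : t.splitOnP (· == ',') with _ | ⟨h0, t'⟩
      · exact absurd hs (pvSplit_ne_nil t)
      · rw [hs] at hq
        simp only [List.modifyHead_cons] at hq
        rcases List.mem_cons.mp hq with h | h
        · subst h
          intro hm
          rcases List.mem_cons.mp hm with h | h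
          · exact hc (by simp [h.symm])
          · exact ih h0 (hs ▸ List.mem_cons_self ..) h
        · exact ih q (hs ▸ List.mem_cons_of_mem _ h)

theorem pvSplit_reassemble (xs : List Char) :
    xs = (xs.splitOnP (· == ',')).headD []
          ++ ((xs.splitOnP (· == ',')).tail).flatMap (fun p => ',' :: p) := by
  induction xs with
  | nil => simp [List.splitOnP_nil]
  | cons c t ih =>
    rw [List.splitOnP_cons]
    by_cases hc : (c == ',') = true
    · rw [if_pos hc]
      have hc' : c = ',' := by simpa using hc
      rcases hs : t.splitOnP (· == ',') with _ | ⟨h0, t'⟩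
      · exact absurd hs (pvSplit_ne_nil t)
      · rw [hs] at ih
        simp only [List.headD_cons, List.tail_cons] at ih
        simp [hc', List.flatMap_cons]
        exact ih
    · rw [if_neg hc]
      rcases hs : t.splitOnP (· == ',') with _ | ⟨h0, t'⟩
      · exact absurd hs (pvSplit_ne_nil t)
      · rw [hs] at ih
        simp only [List.headD_cons, List.tail_cons] at ih
        simp only [List.modifyHead_cons, List.headD_cons, List.tail_cons]
        simpa using ih

-- ===== VERDICT (by name: the statement is the Claim_ definition above) =====
theorem parse_input_with_text_spec : Claim_equal_parse_input_with_text := by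
  intro raw _
  unfold Spec_parse_input_with_text parse_input_with_text parse_input_with_text_alt
  by_cases hpipe : PySem.Chars.isIn ['|'] raw.toList = true
  · simp [hpipe]
  · simp only [hpipe, if_false, Bool.false_eq_true]
    rcases hs : raw.toList.splitOnP (· == ',') with _ | ⟨h0, t⟩
    · exact absurd hs (pvSplit_ne_nil raw.toList)
    · have hre := pvSplit_reassemble raw.toList
      rw [hs] at hre
      simp only [List.headD_cons, List.tail_cons] at hre
      have hnc := pvSplit_no_comma raw.toList
      rw [hs] at hnc
      have hsplit : raw.toList.splitOn ',' = h0 :: t := hs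
      have hscan : raw.toList.foldl pvStepA ([], [], false)
          = (((t.foldl pvStepB ([], h0)).1.map pvF),
             pvRmq (t.foldl pvStepB ([], h0)).2,
             pvQpar (t.foldl pvStepB ([], h0)).2) := by
        conv_lhs => rw [hre]
        rw [List.foldl_append]
        have h0nc : ',' ∉ h0 := hnc h0 (List.mem_cons_self ..)
        rw [pvPieceScan h0 h0nc]
        have : (([], [] ++ pvRmq h0, false ^^ pvQpar h0) :
            List (List Char) × List Char × Bool)
            = (([] : List (List Char)).map pvF, pvRmq h0, pvQpar h0) := by
          simp
        rw [this]
        exact pvMain t (fun x hx => hnc x (List.mem_cons_of_mem _ hx)) [] h0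
      rw [hscan, hsplit]
      simp only [List.headD_cons, List.tail_cons]
      set fl := t.foldl pvStepB ([], h0) with hfl
      by_cases hemp : fl.2.filter (fun c => !pvIsQuote c) = []
      · simp [pvF, pvRmq, hemp]
      · simp [pvF, pvRmq, hemp]
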